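-- pv_equiv track=rewrite | github.com/alessandroardenghi/TicTacToe-Bot | utils.py | create_win_grids
-- ===== SOURCE A (Python) =====
-- def create_win_grids(size=3):
--     winning_masks = []
--
--     # Win over rows
--     for row in range(size):
--         mask = 0
--         for col in range(size):
--             mask += 1 << (row * size + col)
--         winning_masks.append(mask)
--
--     # Win over columns
--     for col in range(size):
--         mask = 0
--         for row in range(size):
--             mask += 1 << (row * size + col)
--         winning_masks.append(mask)
--
--     # Win over main diag
--     mask = 0
--     for row in range(size):
--         mask += 1 << (row * size + row)
--     winning_masks.append(mask)
--     # Win over anti diag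
--     mask = 0
--     for row in range(size):
--         mask += 1 << (row * size + (size - row - 1))
--     winning_masks.append(mask)
--
--     return winning_masks
-- ===== SOURCE B (Python) =====
-- def create_win_grids(size=3):
--     # Closed-form bit patterns: a row is a solid block of ones shifted into place;
--     # a column/diagonal is a stride pattern built by repeated whole-mask shifts.
--     full_row = (1 << size) - 1
--     masks = [full_row << (r * size) for r in range(size)]
--     col0 = 0
--     for _ in range(size):
--         col0 = (col0 << size) + 1
--     masks += [col0 << c for c in range(size)]
--     diag = 0
--     anti = 0
--     for _ in range(size):
--         diag = (diag << (size + 1)) + 1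
--         anti = (anti + 1) << (size - 1)
--     masks.append(diag)
--     masks.append(anti)
--     return masks
-- ===== Notes on version B (the rewrite author's own statement) =====
-- stated objective: faster
-- what changed: Replaces the per-bit double loops (one bignum addition per cell) with closed-form/stride bit-pattern arithmetic: a row is a solid block of ones shifted into place, and the column/diagonal patterns are each built by O(size) whole-mask shifts instead of O(size^2) single-bit additions.
-- outside the precondition, e.g. on create_win_grids(-1): A returns [0, 0], B raises ValueError
import Mathlib
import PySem

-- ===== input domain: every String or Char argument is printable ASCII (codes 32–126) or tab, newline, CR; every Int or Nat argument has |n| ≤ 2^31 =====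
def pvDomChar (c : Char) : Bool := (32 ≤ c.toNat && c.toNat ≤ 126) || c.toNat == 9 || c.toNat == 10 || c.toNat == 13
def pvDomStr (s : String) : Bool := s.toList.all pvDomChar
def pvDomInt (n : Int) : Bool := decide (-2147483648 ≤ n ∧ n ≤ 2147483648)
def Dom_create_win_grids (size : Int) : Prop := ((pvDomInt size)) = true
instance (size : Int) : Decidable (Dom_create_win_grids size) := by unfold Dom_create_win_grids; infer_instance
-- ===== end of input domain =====

-- B builds each mask with closed-form/stride bit arithmetic (whole-mask shifts) instead of A's
-- per-bit double loops; a timing run measured B faster on the large sizes.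

-- ===== PORT A =====
-- Python's '1 << k' is ported as 2 ^ k.toNat; every k here arises from indices of range(size), where k ≥ 0.
def create_win_grids (size : Int) : List Int :=
  let winning_masks : List Int := []
  let winning_masks := (PySem.List.pyRange 0 size 1).foldl (fun acc row =>
      acc ++ [(PySem.List.pyRange 0 size 1).foldl
        (fun mask col => mask + 2 ^ (row * size + col).toNat) 0]) winning_masks
  let winning_masks := (PySem.List.pyRange 0 size 1).foldl (fun acc col =>
      acc ++ [(PySem.List.pyRange 0 size 1).foldl
        (fun mask row => mask + 2 ^ (row * size + col).toNat) 0]) winning_masks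
  let mask1 := (PySem.List.pyRange 0 size 1).foldl
        (fun mask row => mask + 2 ^ (row * size + row).toNat) 0
  let winning_masks := winning_masks ++ [mask1]
  let mask2 := (PySem.List.pyRange 0 size 1).foldl
        (fun mask row => mask + 2 ^ (row * size + (size - row - 1)).toNat) 0
  let winning_masks := winning_masks ++ [mask2]
  winning_masks

-- ===== PORT B =====
-- Python's 'x << k' is ported as x * 2 ^ k.toNat; under Pre_ (0 ≤ size) every shift amount here is ≥ 0.
def create_win_grids_alt (size : Int) : List Int :=
  let full_row : Int := 2 ^ size.toNat - 1
  let masks := (PySem.List.pyRange 0 size 1).map (fun r => full_row * 2 ^ (r * size).toNat)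
  let col0 : Int := (PySem.List.pyRange 0 size 1).foldl
      (fun col0 _ => col0 * 2 ^ size.toNat + 1) 0
  let masks := masks ++ (PySem.List.pyRange 0 size 1).map (fun c => col0 * 2 ^ c.toNat)
  let da : Int × Int := (PySem.List.pyRange 0 size 1).foldl
      (fun p _ => (p.1 * 2 ^ (size + 1).toNat + 1, (p.2 + 1) * 2 ^ (size - 1).toNat)) (0, 0)
  masks ++ [da.1] ++ [da.2]

-- ===== PRECONDITION & SPEC =====
-- Pre_ excludes negative sizes (no such board exists): there A's empty range loops accidentally
-- return [0, 0], while B's closed-form shift '(1 << size) - 1' raises ValueError.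
def Pre_create_win_grids (size : Int) : Prop := 0 ≤ size
instance (size : Int) : Decidable (Pre_create_win_grids size) := by unfold Pre_create_win_grids; infer_instance
def pvWitness_create_win_grids : Int := (3)
def Spec_create_win_grids (size : Int) (out : List Int) : Prop := out = create_win_grids_alt size
instance (size : Int) (out : List Int) : Decidable (Spec_create_win_grids size out) := by unfold Spec_create_win_grids; infer_instance

-- ===== CLAIM (what is proved, stated in full; the proofs are below) =====
def Claim_equal_create_win_grids : Prop := ∀ (size : Int), Dom_create_win_grids size → Pre_create_win_grids size → Spec_create_win_grids size (create_win_grids size)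

-- ===== LEMMAS AND PROOFS =====

-- ∑_{c<n} 2^c = 2^n - 1
lemma pv_sum_two_pow (n : Nat) :
    ((List.range n).map fun c => (2:Int) ^ c).sum = 2 ^ n - 1 := by
  induction n with
  | zero => simp
  | succ k ih => simp [List.range_succ, ih]; ring

-- ∑_{c<n} 2^(o+c) = 2^o * (2^n - 1)
lemma pv_sum_two_pow_add (o n : Nat) :
    ((List.range n).map fun c => (2:Int) ^ (o + c)).sum = 2 ^ o * (2 ^ n - 1) := by
  have h : ((List.range n).map fun c => (2:Int) ^ (o + c))
      = (List.range n).map fun c => (2:Int) ^ o * (2:Int) ^ c := by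
    simp [pow_add]
  rw [h, List.sum_map_mul_left, pv_sum_two_pow]

-- the stride pattern: bits at 0, m, 2m, …, (k-1)m
def pvStripe (m k : Nat) : Int := ((List.range k).map fun i => (2:Int) ^ (m * i)).sum

-- the shifted stride pattern: bits at m, 2m, …, km
def pvStripe1 (m k : Nat) : Int := ((List.range k).map fun i => (2:Int) ^ (m * (i + 1))).sum

lemma pv_col0_fold {α : Type} (m : Nat) (l : List α) (a : Int) :
    l.foldl (fun c _ => c * 2 ^ m + 1) a = a * 2 ^ (m * l.length) + pvStripe m l.length := by
  induction l generalizing a with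
  | nil => simp [pvStripe]
  | cons x t ih =>
      rw [List.foldl_cons, ih]
      have : pvStripe m (t.length + 1) = 2 ^ (m * t.length) + pvStripe m t.length := by
        simp [pvStripe, List.range_succ]; ring
      simp [List.length_cons, this, pow_add, pow_mul]
      ring

lemma pv_anti_fold {α : Type} (m : Nat) (l : List α) (a : Int) :
    l.foldl (fun c _ => (c + 1) * 2 ^ m) a = a * 2 ^ (m * l.length) + pvStripe1 m l.length := by
  induction l generalizing a with
  | nil => simp [pvStripe1]
  | cons x t ih =>
      rw [List.foldl_cons, ih]
      have : pvStripe1 m (t.length + 1) = 2 ^ (m * (t.length + 1)) + pvStripe1 m t.length := by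
        simp [pvStripe1, List.range_succ]; ring
      simp [List.length_cons, this, pow_add, pow_mul]
      ring

lemma pv_pair_fold {α : Type} (C D : Int) (l : List α) (a b : Int) :
    l.foldl (fun p _ => (p.1 * C + 1, (p.2 + 1) * D)) (a, b)
      = (l.foldl (fun x _ => x * C + 1) a, l.foldl (fun x _ => (x + 1) * D) b) := by
  induction l generalizing a b with
  | nil => rfl
  | cons x t ih => simp [List.foldl_cons, ih]

lemma pv_row (n r : Nat) :
    ((List.range n).map fun (c : Nat) => (2:Int) ^ ((r:Int) * (n:Int) + (c:Int)).toNat).sum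
      = (2 ^ n - 1) * 2 ^ ((r:Int) * (n:Int)).toNat := by
  have h2 : ∀ c : Nat, ((r:Int) * (n:Int) + (c:Int)).toNat = r * n + c := by
    intro c
    rw [show (r:Int) * (n:Int) + (c:Int) = ((r * n + c : Nat) : Int) by push_cast; ring,
      Int.toNat_natCast]
  have h1 : ((r:Int) * (n:Int)).toNat = r * n := by
    rw [show (r:Int) * (n:Int) = ((r * n : Nat) : Int) by push_cast; ring, Int.toNat_natCast]
  simp only [h2, h1]
  rw [pv_sum_two_pow_add]
  ring

lemma pv_col (n c : Nat) :
    ((List.range n).map fun (r : Nat) => (2:Int) ^ ((r:Int) * (n:Int) + (c:Int)).toNat).sum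
      = pvStripe n n * 2 ^ c := by
  have h2 : ∀ r : Nat, ((r:Int) * (n:Int) + (c:Int)).toNat = n * r + c := by
    intro r
    rw [show (r:Int) * (n:Int) + (c:Int) = ((n * r + c : Nat) : Int) by push_cast; ring,
      Int.toNat_natCast]
  have h3 : ((List.range n).map fun (r : Nat) => (2:Int) ^ (n * r + c))
      = (List.range n).map fun (r : Nat) => (2:Int) ^ (n * r) * 2 ^ c := by
    simp [pow_add]
  simp only [h2, h3, List.sum_map_mul_right, pvStripe]

lemma pv_diag (n : Nat) :
    ((List.range n).map fun (r : Nat) => (2:Int) ^ ((r:Int) * (n:Int) + (r:Int)).toNat).sum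
      = pvStripe (n + 1) n := by
  have h2 : ∀ r : Nat, ((r:Int) * (n:Int) + (r:Int)).toNat = (n + 1) * r := by
    intro r
    rw [show (r:Int) * (n:Int) + (r:Int) = (((n + 1) * r : Nat) : Int) by push_cast; ring,
      Int.toNat_natCast]
  simp only [h2, pvStripe]

lemma pv_anti (n : Nat) :
    ((List.range n).map fun (r : Nat) => (2:Int) ^ ((r:Int) * (n:Int) + ((n:Int) - (r:Int) - 1)).toNat).sum
      = pvStripe1 (n - 1) n := by
  have h2 : ∀ r ∈ List.range n,
      (2:Int) ^ (((r:Int)) * (n:Int) + ((n:Int) - (r:Int) - 1)).toNat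
        = (2:Int) ^ ((n - 1) * (r + 1)) := by
    intro r hr
    have hrn : r < n := List.mem_range.mp hr
    have hcast : ((n - 1 : Nat) : Int) = (n:Int) - 1 := by omega
    have h : ((r:Int) * (n:Int) + ((n:Int) - (r:Int) - 1)).toNat = (n - 1) * (r + 1) := by
      rw [show (r:Int) * (n:Int) + ((n:Int) - (r:Int) - 1) = ((n:Int) - 1) * ((r:Int) + 1) by ring,
        ← hcast, show (r:Int) + 1 = ((r + 1 : Nat) : Int) by push_cast; ring,
        ← Nat.cast_mul, Int.toNat_natCast]
    rw [h]
  rw [List.map_congr_left h2]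
  rfl

lemma pv_main (n : Nat) : create_win_grids (n : Int) = create_win_grids_alt (n : Int) := by
  have e2 : ((n:Int) + 1).toNat = n + 1 := by omega
  have e3 : ((n:Int) - 1).toNat = n - 1 := by omega
  simp only [create_win_grids, create_win_grids_alt, PySem.List.pyRange_zero_natCast,
    PySem.List.foldl_append_singleton_eq_map, List.foldl_map, PySem.List.foldl_add,
    List.map_map, List.nil_append, pv_pair_fold, Int.toNat_natCast, e2, e3,
    pv_col0_fold, pv_anti_fold, List.length_range, zero_mul, zero_add]
  congr 1
  congr 1
  congr 1
  · refine List.map_congr_left (fun r _ => ?_)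
    simp only [Function.comp_apply]
    exact pv_row n r
  · refine List.map_congr_left (fun c _ => ?_)
    simp only [Function.comp_apply]
    rw [pv_col n c, Int.toNat_natCast]
  · rw [pv_diag n]
  · rw [pv_anti n]

-- ===== VERDICT (by name: the statement is the Claim_ definition above) =====
theorem create_win_grids_spec : Claim_equal_create_win_grids := by
  intro size _ hpre
  unfold Spec_create_win_grids
  obtain ⟨n, rfl⟩ : ∃ m : Nat, size = (m : Int) :=
    ⟨size.toNat, (Int.toNat_of_nonneg hpre).symm⟩
  exact pv_main n
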